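-- pv_equiv track=rewrite | github.com/yuhi-dope/ai_agent_all | develop_agent/nodes/github_publisher.py | _parse_pr_rules
-- ===== SOURCE A (Python) =====
-- def _parse_pr_rules(pr_rules_text: str) -> tuple[str | None, str | None]:
--     """pr_rules.md から title と body をパース。見つからなければ (None, None)。"""
--     title: str | None = None
--     body: str | None = None
--     lines = pr_rules_text.strip().split("\n")
--     i = 0
--     while i < len(lines):
--         line = lines[i]
--         if line.strip().lower().startswith("title:"):
--             title = line.split(":", 1)[1].strip()
--             i += 1
--             continue
--         if line.strip().lower().startswith("body:"):
--             rest = [lines[j] for j in range(i + 1, len(lines))]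
--             body_lines = []
--             for L in rest:
--                 if L.strip() == "---":
--                     break
--                 body_lines.append(L)
--             body = "\n".join(body_lines).strip() if body_lines else ""
--             break
--         i += 1
--     return (title, body)
-- ===== SOURCE B (Python) =====
-- def _parse_pr_rules(pr_rules_text: str) -> tuple[str | None, str | None]:
--     """Single index-based decomposition: locate the first 'body:' line, then
--     derive title from the lines before it and body from the lines after it."""
--     lines = pr_rules_text.strip().split("\n")
--     body_idx = next(
--         (i for i, l in enumerate(lines) if l.strip().lower().startswith("body:")),
--         None,
--     )
--     head = lines if body_idx is None else lines[:body_idx]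
--     title = None
--     for l in reversed(head):  # last 'title:' line before the body wins
--         if l.strip().lower().startswith("title:"):
--             title = l.split(":", 1)[1].strip()
--             break
--     body = None
--     if body_idx is not None:
--         kept = []
--         for l in lines[body_idx + 1:]:
--             if l.strip() == "---":
--                 break
--             kept.append(l)
--         body = "\n".join(kept).strip()
--     return (title, body)
-- ===== Notes on version B (the rewrite author's own statement) =====
-- stated objective: simpler
-- what changed: Replaces A's single stateful while-loop (with continue/break and an in-loop body collection) by a three-step decomposition: find the index of the first 'body:' line, pick the last 'title:' line before it from the head slice, and build the body from the tail slice up to '---'.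
import Mathlib
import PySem

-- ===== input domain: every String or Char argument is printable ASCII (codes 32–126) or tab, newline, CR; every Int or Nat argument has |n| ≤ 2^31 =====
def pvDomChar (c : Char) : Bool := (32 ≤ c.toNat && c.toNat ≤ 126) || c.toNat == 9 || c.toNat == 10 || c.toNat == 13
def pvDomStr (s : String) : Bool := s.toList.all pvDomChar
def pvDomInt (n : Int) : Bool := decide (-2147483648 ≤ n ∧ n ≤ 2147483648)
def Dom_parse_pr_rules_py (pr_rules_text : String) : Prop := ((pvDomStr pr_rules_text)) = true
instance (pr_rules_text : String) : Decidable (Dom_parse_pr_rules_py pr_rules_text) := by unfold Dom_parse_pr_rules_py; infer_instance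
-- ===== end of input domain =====

-- B replaces A's stateful while-loop by a find-the-body-index / head-slice / tail-slice decomposition (objective: simpler).

-- ===== PORT A =====
-- line.split(":", 1)[1].strip(); the guard guarantees a colon is present, so index 1 exists
def aTitleOf (line : String) : String :=
  PySem.Str.strip (((PySem.Str.splitMax? line ":" 1).getD []).getD 1 "")

-- the inner 'for L in rest: if L.strip() == "---": break; body_lines.append(L)'
def aBodyLines : List String → List String
  | [] => []
  | L :: rest => if PySem.Str.strip L == "---" then [] else L :: aBodyLines rest

-- the while-loop: state is (remaining lines, title); 'continue' = recurse, 'break' = return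
def aLoop : List String → Option String → Option String × Option String
  | [], title => (title, none)
  | line :: rest, title =>
    if PySem.Str.startswith (PySem.Str.lower (PySem.Str.strip line)) "title:" then
      aLoop rest (some (aTitleOf line))
    else if PySem.Str.startswith (PySem.Str.lower (PySem.Str.strip line)) "body:" then
      (title,
        some (let bls := aBodyLines rest
              if bls.isEmpty then "" else PySem.Str.strip (PySem.Str.join "\n" bls)))
    else aLoop rest title

def parse_pr_rules_py (pr_rules_text : String) : Option String × Option String :=
  aLoop ((PySem.Str.split? (PySem.Str.strip pr_rules_text) "\n").getD []) none

-- ===== PORT B =====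
def bIsBody (l : String) : Bool :=
  PySem.Str.startswith (PySem.Str.lower (PySem.Str.strip l)) "body:"

def bIsTitle (l : String) : Bool :=
  PySem.Str.startswith (PySem.Str.lower (PySem.Str.strip l)) "title:"

def bTitleOf (line : String) : String :=
  PySem.Str.strip (((PySem.Str.splitMax? line ":" 1).getD []).getD 1 "")

def parse_pr_rules_py_alt (pr_rules_text : String) : Option String × Option String :=
  let lines := (PySem.Str.split? (PySem.Str.strip pr_rules_text) "\n").getD []
  let bodyIdx := lines.findIdx? bIsBody
  let head := match bodyIdx with | none => lines | some i => lines.take i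
  let title : Option String :=
    match head.reverse.find? bIsTitle with
    | some l => some (bTitleOf l)
    | none => none
  let body : Option String :=
    match bodyIdx with
    | none => none
    | some i =>
      some (PySem.Str.strip (PySem.Str.join "\n"
        ((lines.drop (i + 1)).takeWhile (fun L => !(PySem.Str.strip L == "---")))))
  (title, body)

-- ===== PRECONDITION & SPEC =====
def Spec_parse_pr_rules_py (pr_rules_text : String) (out : Option String × Option String) : Prop := out = parse_pr_rules_py_alt pr_rules_text
instance (pr_rules_text : String) (out : Option String × Option String) : Decidable (Spec_parse_pr_rules_py pr_rules_text out) := by unfold Spec_parse_pr_rules_py; infer_instance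

-- ===== CLAIM (what is proved, stated in full; the proofs are below) =====
def Claim_equal_parse_pr_rules_py : Prop := ∀ (pr_rules_text : String), Dom_parse_pr_rules_py pr_rules_text → Spec_parse_pr_rules_py pr_rules_text (parse_pr_rules_py pr_rules_text)

-- ===== LEMMAS AND PROOFS =====

-- a line cannot start with both "title:" and "body:"
theorem not_body_of_title (l : String) (h : bIsTitle l = true) : bIsBody l = false := by
  unfold bIsTitle at h
  unfold bIsBody
  simp only [PySem.Str.startswith_eq] at *
  rw [PySem.Chars.startswith_iff] at h
  by_contra hb
  rw [Bool.not_eq_false, PySem.Chars.startswith_iff] at hb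
  have := List.prefix_of_prefix_length_le hb h (by decide)
  revert this; decide

-- A's body collection is a takeWhile
theorem aBodyLines_eq (rest : List String) :
    aBodyLines rest = rest.takeWhile (fun L => !(PySem.Str.strip L == "---")) := by
  induction rest with
  | nil => rfl
  | cons L rest ih =>
    unfold aBodyLines
    by_cases h : PySem.Str.strip L == "---"
    · simp [h]
    · simp only [Bool.not_eq_true] at h
      simp [h, ih]

-- the empty-list special case of A collapses into B's uniform formula
theorem aBody_eq (rest : List String) :
    (let bls := aBodyLines rest
     if bls.isEmpty then "" else PySem.Str.strip (PySem.Str.join "\n" bls)) =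
    PySem.Str.strip (PySem.Str.join "\n"
      (rest.takeWhile (fun L => !(PySem.Str.strip L == "---")))) := by
  rw [← aBodyLines_eq]
  by_cases h : (aBodyLines rest).isEmpty
  · rw [List.isEmpty_iff] at h
    simp [h]
    decide
  · simp [h]

-- main loop invariant: A's while-loop equals B's decomposition, for any accumulated title
theorem loop_spec (lines : List String) (title : Option String) :
    aLoop lines title =
      ((match (match lines.findIdx? bIsBody with
               | none => lines
               | some i => lines.take i).reverse.find? bIsTitle with
        | some l => some (bTitleOf l)
        | none => title),
       (match lines.findIdx? bIsBody with
        | none => none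
        | some i =>
          some (PySem.Str.strip (PySem.Str.join "\n"
            ((lines.drop (i + 1)).takeWhile (fun L => !(PySem.Str.strip L == "---"))))))) := by
  induction lines generalizing title with
  | nil => rfl
  | cons line rest ih =>
    unfold aLoop
    by_cases ht : bIsTitle line
    · have hb : bIsBody line = false := not_body_of_title line ht
      unfold bIsTitle at ht
      rw [ht, ih]
      have hfind : (line :: rest).findIdx? bIsBody = (rest.findIdx? bIsBody).map (· + 1) := by
        simp [List.findIdx?_cons, hb]
      rw [hfind]
      cases hidx : rest.findIdx? bIsBody with
      | none =>
        simp only [Option.map_none, List.reverse_cons, List.find?_append]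
        cases hf : rest.reverse.find? bIsTitle with
        | none =>
          simp [List.find?, show bIsTitle line = true from ht, aTitleOf, bTitleOf]
        | some l => simp
      | some i =>
        simp only [Option.map_some, List.take_succ_cons, List.reverse_cons,
          List.find?_append, List.drop_succ_cons]
        cases hf : (rest.take i).reverse.find? bIsTitle with
        | none =>
          simp [List.find?, show bIsTitle line = true from ht, aTitleOf, bTitleOf]
        | some l => simp
    · simp only [Bool.not_eq_true] at ht
      have ht' : PySem.Str.startswith (PySem.Str.lower (PySem.Str.strip line)) "title:" = false := ht
      rw [ht']
      simp only [Bool.false_eq_true, if_false]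
      by_cases hb : bIsBody line
      · have hb' : PySem.Str.startswith (PySem.Str.lower (PySem.Str.strip line)) "body:" = true := hb
        rw [hb']
        simp only [if_true]
        have hfind : (line :: rest).findIdx? bIsBody = some 0 := by
          simp [List.findIdx?_cons, hb]
        rw [hfind]
        simp only [List.take_zero, List.reverse_nil, List.find?_nil, List.drop_succ_cons,
          List.drop_zero]
        rw [aBody_eq]
      · have hb' : PySem.Str.startswith (PySem.Str.lower (PySem.Str.strip line)) "body:" = false := by
          simpa [bIsBody] using hb
        rw [hb']
        simp only [Bool.false_eq_true, if_false]
        rw [ih]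
        have hfind : (line :: rest).findIdx? bIsBody = (rest.findIdx? bIsBody).map (· + 1) := by
          simp [List.findIdx?_cons, hb]
        rw [hfind]
        cases hidx : rest.findIdx? bIsBody with
        | none =>
          simp only [Option.map_none, List.reverse_cons, List.find?_append]
          cases hf : rest.reverse.find? bIsTitle with
          | none => simp [List.find?, show bIsTitle line = false from ht]
          | some l => simp
        | some i =>
          simp only [Option.map_some, List.take_succ_cons, List.reverse_cons,
            List.find?_append, List.drop_succ_cons]
          cases hf : (rest.take i).reverse.find? bIsTitle with
          | none => simp [List.find?, show bIsTitle line = false from ht]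
          | some l => simp

-- ===== VERDICT (by name: the statement is the Claim_ definition above) =====
theorem parse_pr_rules_py_spec : Claim_equal_parse_pr_rules_py := by
  intro t _
  unfold Spec_parse_pr_rules_py parse_pr_rules_py parse_pr_rules_py_alt
  rw [loop_spec]
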